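-- pv_equiv track=rewrite | github.com/dniminenn/isekaiprotocol | oracle/isekai_s0.py | determine_token_id_crystal
-- ===== SOURCE A (Python) =====
-- def determine_token_id_crystal(random_number):
--     """
--     Determines the ID of the token to be minted based on probabilities.
--     Probabilities reflect Crystals mint method, which are LP
--     farm rewards.
--
--     Args:
--         random_number (int): A random number between 0 and 10000.
--
--     Returns:
--         int: The ID of the token to be minted.
--     """
--     # minting odds are determined here
--     probabilities = [4750, 4750, 500]
--     current_sum = 0
--
--     for i, probability in enumerate(probabilities):
--         current_sum += probability
--         if random_number < current_sum:
--             return i + 1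
--     return 1
-- ===== SOURCE B (Python) =====
-- import bisect
--
-- _CUM = [4750, 9500, 10000]   # cumulative probability boundaries
-- _TOKEN = [1, 2, 3, 1]        # token per interval; >= 10000 falls back to 1 (A's explicit final return)
--
-- def determine_token_id_crystal(random_number):
--     return _TOKEN[bisect.bisect_right(_CUM, random_number)]
-- ===== Notes on version B (the rewrite author's own statement) =====
-- stated objective: simpler
-- what changed: Replaces the running-sum enumerate loop with precomputed cumulative boundaries and a single bisect_right lookup into a token table (fallback 1 for random_number >= 10000, matching A's final return).
import Mathlib
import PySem

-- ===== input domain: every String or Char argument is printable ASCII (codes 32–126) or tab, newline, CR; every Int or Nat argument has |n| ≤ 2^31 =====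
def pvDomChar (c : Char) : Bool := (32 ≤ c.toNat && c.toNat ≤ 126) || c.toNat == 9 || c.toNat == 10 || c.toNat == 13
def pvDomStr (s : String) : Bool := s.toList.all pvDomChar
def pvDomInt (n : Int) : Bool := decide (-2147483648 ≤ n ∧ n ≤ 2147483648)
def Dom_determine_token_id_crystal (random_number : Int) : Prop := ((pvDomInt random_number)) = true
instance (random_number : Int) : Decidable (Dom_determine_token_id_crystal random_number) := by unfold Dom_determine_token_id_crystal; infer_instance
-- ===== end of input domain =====

-- B replaces the running-sum loop with a bisect_right over precomputed cumulative boundaries (objective: simpler).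

-- ===== PORT A =====
-- Loop over enumerate(probabilities) with running sum and early return (Option accumulator).
def dtcLoop (random_number : Int) : List (Int × Int) → Int → Int
  | [], _ => 1
  | (i, p) :: rest, s =>
    let s' := s + p
    if random_number < s' then i + 1 else dtcLoop random_number rest s'

def determine_token_id_crystal (random_number : Int) : Int :=
  dtcLoop random_number [(0, 4750), (1, 4750), (2, 500)] 0

-- ===== PORT B =====
-- B: bisect_right into the cumulative boundaries, then a token-table lookup.
def determine_token_id_crystal_alt (random_number : Int) : Int :=
  ([1, 2, 3, 1] : List Int).getD (PySem.List.bisectRight [(4750 : Int), 9500, 10000] random_number) 1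

-- ===== PRECONDITION & SPEC =====
def Spec_determine_token_id_crystal (random_number : Int) (out : Int) : Prop := out = determine_token_id_crystal_alt random_number
instance (random_number : Int) (out : Int) : Decidable (Spec_determine_token_id_crystal random_number out) := by unfold Spec_determine_token_id_crystal; infer_instance

-- ===== CLAIM (what is proved, stated in full; the proofs are below) =====
def Claim_equal_determine_token_id_crystal : Prop := ∀ (random_number : Int), Dom_determine_token_id_crystal random_number → Spec_determine_token_id_crystal random_number (determine_token_id_crystal random_number)

-- ===== LEMMAS AND PROOFS =====

-- ===== VERDICT (by name: the statement is the Claim_ definition above) =====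
theorem determine_token_id_crystal_spec : Claim_equal_determine_token_id_crystal := by
  intro n _
  unfold Spec_determine_token_id_crystal determine_token_id_crystal determine_token_id_crystal_alt
  simp only [dtcLoop, PySem.List.bisectRight]
  rcases lt_or_ge n 4750 with h | h
  · norm_num [PySem.List.bisectRightLoop, pysem, h, show n < 9500 by omega]
  rcases lt_or_ge n 9500 with h2 | h2
  · norm_num [PySem.List.bisectRightLoop, pysem, h2, show ¬ n < 4750 by omega]
  rcases lt_or_ge n 10000 with h3 | h3
  · norm_num [PySem.List.bisectRightLoop, pysem, h3, show ¬ n < 4750 by omega,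
      show ¬ n < 9500 by omega]
  · norm_num [PySem.List.bisectRightLoop, pysem, show ¬ n < 4750 by omega,
      show ¬ n < 9500 by omega, show ¬ n < 10000 by omega]
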